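-- pv_equiv track=rewrite | github.com/Starzinthenight/Soulaligned | blueprint_utils.py | calculate_destiny_number
-- ===== SOURCE A (Python) =====
-- def reduce_number(n):
--     """Reduce a number to a single digit unless it is a master number (11, 22, 33)."""
--     while n > 9 and n not in [11, 22, 33]:
--         n = sum(int(digit) for digit in str(n))
--     return n
--
-- def calculate_destiny_number(name):
--     """Calculate Destiny Number from full name."""
--     letter_values = {
--         'A':1,'B':2,'C':3,'D':4,'E':5,'F':6,'G':7,'H':8,'I':9,
--         'J':1,'K':2,'L':3,'M':4,'N':5,'O':6,'P':7,'Q':8,'R':9,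
--         'S':1,'T':2,'U':3,'V':4,'W':5,'X':6,'Y':7,'Z':8
--     }
--     name = name.upper()
--     total = sum(letter_values.get(c, 0) for c in name if c.isalpha())
--     return reduce_number(total)
-- ===== SOURCE B (Python) =====
-- def _digit_sum(n):
--     s = 0
--     while n > 0:
--         s += n % 10
--         n //= 10
--     return s
--
--
-- def _reduce(n):
--     if n <= 9 or n in (11, 22, 33):
--         return n
--     return _reduce(_digit_sum(n))
--
--
-- def calculate_destiny_number(name):
--     """Calculate Destiny Number from full name."""
--     total = sum((ord(c) - ord('A')) % 9 + 1
--                 for c in name.upper() if 'A' <= c <= 'Z')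
--     return _reduce(total)
-- ===== Notes on version B (the rewrite author's own statement) =====
-- stated objective: idiomatic
-- what changed: Replaces the 26-entry letter-value table by the closed form ((ord(c)-ord('A')) % 9) + 1 guarded by an explicit uppercase-ASCII range test, and replaces the while-loop string-digit reduction by a recursive reduce over an arithmetic digit sum (no str/int round-trip).
import Mathlib
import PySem

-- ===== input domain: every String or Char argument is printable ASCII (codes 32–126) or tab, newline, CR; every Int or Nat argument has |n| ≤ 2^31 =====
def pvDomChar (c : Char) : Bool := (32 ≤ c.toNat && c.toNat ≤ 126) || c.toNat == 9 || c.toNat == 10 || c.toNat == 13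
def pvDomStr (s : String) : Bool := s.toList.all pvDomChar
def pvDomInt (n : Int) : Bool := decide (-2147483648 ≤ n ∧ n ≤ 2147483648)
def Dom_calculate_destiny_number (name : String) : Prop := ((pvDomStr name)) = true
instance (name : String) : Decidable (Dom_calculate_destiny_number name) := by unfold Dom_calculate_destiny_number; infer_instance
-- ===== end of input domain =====

-- B replaces the letter-value table by a closed-form letter value (alphabet index mod 9, plus 1)
-- guarded by an uppercase-ASCII range test, and the str-based digit reduction by a recursive
-- arithmetic digit sum (objective: idiomatic; same asymptotic cost).

-- ===== PORT A =====
-- int(digit) for a single character; in A this is only reached on decimal-digit characters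
-- (the characters of str(n) for n ≥ 0), where it is exact.
def pvCharVal (c : Char) : Int := (PySem.Int.ofChars? [c]).getD 0

-- sum(int(digit) for digit in str(n))
def pvDigitSumStr (n : Int) : Int :=
  (PySem.Int.toChars n).foldl (fun acc d => acc + pvCharVal d) 0

-- reduce_number's while loop, with fuel; n.toNat + 1 steps always suffice, since the digit sum
-- of n strictly decreases below n while n > 9 (pvReduceFuelA_congr below), so the guard never
-- changes the computed value.
def pvReduceFuelA : Nat → Int → Int
  | 0, n => n
  | f + 1, n =>
    if 9 < n ∧ ¬(n = 11 ∨ n = 22 ∨ n = 33) then pvReduceFuelA f (pvDigitSumStr n) else n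

-- while n > 9 and n not in [11, 22, 33]: n = sum(int(digit) for digit in str(n))
def reduce_number (n : Int) : Int := pvReduceFuelA (n.toNat + 1) n

def pvLetterValues : PySem.Dict Char Int := PySem.Dict.ofList
  [('A',1),('B',2),('C',3),('D',4),('E',5),('F',6),('G',7),('H',8),('I',9),
   ('J',1),('K',2),('L',3),('M',4),('N',5),('O',6),('P',7),('Q',8),('R',9),
   ('S',1),('T',2),('U',3),('V',4),('W',5),('X',6),('Y',7),('Z',8)]

def calculate_destiny_number (name : String) : Int :=
  let up := PySem.Str.upper name
  let total := up.toList.foldl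
    (fun acc c => if PySem.Chars.isalpha c then acc + pvLetterValues.getD c 0 else acc) 0
  reduce_number total

-- ===== PORT B =====
-- _digit_sum's while loop, with fuel; n.toNat steps always suffice since n //= 10 reaches 0
-- in at most that many steps.
def pvDigitSumFuelB : Nat → Int → Int → Int
  | 0, s, _ => s
  | f + 1, s, n =>
    if 0 < n then pvDigitSumFuelB f (s + PySem.Int.mod n 10) (PySem.Int.floordiv n 10) else s

-- _digit_sum(n): s = 0; while n > 0: s += n % 10; n //= 10
def pvDigitSumB (s n : Int) : Int := pvDigitSumFuelB n.toNat s n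

-- _reduce(n): return n if n <= 9 or n in (11, 22, 33) else _reduce(_digit_sum(n));
-- recursion depth is at most n.toNat + 1 (the digit sum strictly decreases below n).
def pvReduceFuelB : Nat → Int → Int
  | 0, n => n
  | f + 1, n =>
    if n ≤ 9 ∨ n = 11 ∨ n = 22 ∨ n = 33 then n else pvReduceFuelB f (pvDigitSumB 0 n)

def reduce_alt (n : Int) : Int := pvReduceFuelB (n.toNat + 1) n

def calculate_destiny_number_alt (name : String) : Int :=
  let total := (PySem.Str.upper name).toList.foldl
    (fun acc c =>
      if 'A' ≤ c ∧ c ≤ 'Z' then acc + (PySem.Int.mod ((c.toNat : Int) - 65) 9 + 1) else acc) 0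
  reduce_alt total

-- ===== PRECONDITION & SPEC =====
def Spec_calculate_destiny_number (name : String) (out : Int) : Prop := out = calculate_destiny_number_alt name
instance (name : String) (out : Int) : Decidable (Spec_calculate_destiny_number name out) := by unfold Spec_calculate_destiny_number; infer_instance

-- ===== CLAIM (what is proved, stated in full; the proofs are below) =====
def Claim_equal_calculate_destiny_number : Prop := ∀ (name : String), Dom_calculate_destiny_number name → Spec_calculate_destiny_number name (calculate_destiny_number name)

-- ===== LEMMAS AND PROOFS =====

-- arithmetic digit sum on Nat, the common reference point of the two reductions
def pvDsumN (m : Nat) : Nat :=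
  if m = 0 then 0 else pvDsumN (m / 10) + m % 10
  decreasing_by exact Nat.div_lt_self (by omega) (by norm_num)

theorem pvDsumN_le (m : Nat) : pvDsumN m ≤ m := by
  induction m using pvDsumN.induct with
  | case1 => simp [pvDsumN]
  | case2 m h ih =>
    rw [pvDsumN, if_neg h]
    have := Nat.div_add_mod m 10
    omega

theorem pvDsumN_lt (m : Nat) (h : 10 ≤ m) : pvDsumN m < m := by
  rw [pvDsumN, if_neg (by omega)]
  have h1 := pvDsumN_le (m / 10)
  have := Nat.div_add_mod m 10
  have : 1 ≤ m / 10 := by omega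
  omega

theorem pvCharVal_digitChar (r : Nat) (h : r < 10) :
    pvCharVal (Nat.digitChar r) = (r : Int) := by
  interval_cases r <;> decide

theorem pvSum_toDigitsCore (f : Nat) : ∀ (n : Nat) (l : List Char), n < 10 ^ f →
    ((Nat.toDigitsCore 10 f n l).map pvCharVal).sum
      = (pvDsumN n : Int) + (l.map pvCharVal).sum := by
  induction f with
  | zero =>
    intro n l hn
    have : n = 0 := by omega
    subst this
    simp [Nat.toDigitsCore, pvDsumN]
  | succ f ih =>
    intro n l hn
    rw [Nat.toDigitsCore]
    by_cases h0 : n / 10 = 0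
    · rw [if_pos h0]
      have hr : n % 10 < 10 := Nat.mod_lt _ (by norm_num)
      have hd : pvDsumN n = n % 10 := by
        by_cases hz : n = 0
        · subst hz; simp [pvDsumN]
        · rw [pvDsumN, if_neg hz, h0]; simp [pvDsumN]
      simp only [List.map_cons, List.sum_cons, pvCharVal_digitChar _ hr, hd]
    · rw [if_neg h0]
      have hlt : n / 10 < 10 ^ f := by
        rw [Nat.div_lt_iff_lt_mul (by norm_num)]
        calc n < 10 ^ (f + 1) := hn
        _ = 10 ^ f * 10 := by ring
      have hz : n ≠ 0 := by omega
      have hr : n % 10 < 10 := Nat.mod_lt _ (by norm_num)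
      have hdn : pvDsumN n = pvDsumN (n / 10) + n % 10 := by
        rw [pvDsumN, if_neg hz]
      rw [ih (n / 10) _ hlt, hdn]
      simp only [List.map_cons, List.sum_cons, pvCharVal_digitChar _ hr]
      push_cast
      ring

theorem pvDigitSumStr_eq (n : Int) (h : 0 ≤ n) :
    pvDigitSumStr n = (pvDsumN n.toNat : Int) := by
  unfold pvDigitSumStr PySem.Int.toChars
  rw [if_neg (by omega), PySem.List.foldl_add]
  unfold Nat.toDigits
  have hlt : n.toNat < 10 ^ (n.toNat + 1) :=
    lt_of_lt_of_le (Nat.lt_pow_self (by norm_num))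
      (Nat.pow_le_pow_right (by norm_num) (Nat.le_succ _))
  rw [pvSum_toDigitsCore _ _ _ hlt]
  simp

theorem pvDigitSumFuelB_eq (f : Nat) : ∀ (s n : Int), 0 ≤ n → n.toNat ≤ f →
    pvDigitSumFuelB f s n = s + (pvDsumN n.toNat : Int) := by
  induction f with
  | zero =>
    intro s n hn hf
    have : n = 0 := by omega
    subst this
    simp [pvDigitSumFuelB, pvDsumN]
  | succ f ih =>
    intro s n hn hf
    rw [pvDigitSumFuelB]
    by_cases h : 0 < n
    · rw [if_pos h]
      have hdiv : PySem.Int.floordiv n 10 = n / 10 :=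
        PySem.Int.floordiv_eq_ediv_of_pos (by norm_num)
      have hmod : PySem.Int.mod n 10 = n % 10 :=
        PySem.Int.mod_eq_emod_of_pos (by norm_num)
      rw [ih _ _ (by rw [hdiv]; omega) (by rw [hdiv]; omega)]
      have hz : n.toNat ≠ 0 := by omega
      have hdn : pvDsumN n.toNat = pvDsumN (n.toNat / 10) + n.toNat % 10 := by
        rw [pvDsumN, if_neg hz]
      rw [hdn]
      have h1 : (PySem.Int.floordiv n 10).toNat = n.toNat / 10 := by
        rw [hdiv]; omega
      have h2 : PySem.Int.mod n 10 = ((n.toNat % 10 : Nat) : Int) := by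
        rw [hmod]; omega
      rw [h1, h2]
      push_cast
      ring
    · rw [if_neg h]
      have : n = 0 := by omega
      subst this
      simp [pvDsumN]

theorem pvDigitSumB_eq (n : Int) (h : 0 ≤ n) :
    pvDigitSumB 0 n = (pvDsumN n.toNat : Int) := by
  unfold pvDigitSumB
  rw [pvDigitSumFuelB_eq n.toNat 0 n h le_rfl, zero_add]

-- the two fueled reductions agree whenever the fuel exceeds the start value
theorem pvReduceFuel_eq (f : Nat) : ∀ n : Int, 0 ≤ n → n.toNat < f →
    pvReduceFuelA f n = pvReduceFuelB f n := by
  induction f with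
  | zero => intro n _ hf; omega
  | succ f ih =>
    intro n hn hf
    rw [pvReduceFuelA, pvReduceFuelB]
    by_cases h : 9 < n ∧ ¬(n = 11 ∨ n = 22 ∨ n = 33)
    · rw [if_pos h, if_neg (by omega)]
      rw [pvDigitSumStr_eq n hn, ← pvDigitSumB_eq n hn]
      apply ih _ (by rw [pvDigitSumB_eq n hn]; positivity)
      rw [pvDigitSumB_eq n hn]
      have := pvDsumN_lt n.toNat (by omega)
      simp only [Int.toNat_natCast]
      omega
    · rw [if_neg h, if_pos (by omega)]

theorem pvReduce_eq (n : Int) (h : 0 ≤ n) : reduce_number n = reduce_alt n := by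
  unfold reduce_number reduce_alt
  exact pvReduceFuel_eq (n.toNat + 1) n h (by omega)

-- per-character agreement of the two loop bodies, on the whole ASCII range, checked by decide
def pvCharOK (c : Char) : Bool :=
  pvDomChar (PySem.Chars.upperChar c) &&
  ((if PySem.Chars.isalpha c then pvLetterValues.getD c 0 else 0)
    == (if 'A' ≤ c ∧ c ≤ 'Z' then PySem.Int.mod ((c.toNat : Int) - 65) 9 + 1 else 0))

set_option maxRecDepth 8192 in
theorem pvCharOK_range : ((List.range 127).all
    (fun m => !pvDomChar (Char.ofNat m) || pvCharOK (Char.ofNat m))) = true := by decide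

theorem pvCharOK_of_dom (c : Char) (hc : pvDomChar c = true) : pvCharOK c = true := by
  have h127 : c.toNat < 127 := by
    simp only [pvDomChar, Bool.or_eq_true, Bool.and_eq_true, decide_eq_true_eq, beq_iff_eq] at hc
    omega
  have h1 := List.all_eq_true.mp pvCharOK_range c.toNat (List.mem_range.mpr h127)
  rw [Char.ofNat_toNat] at h1
  simp only [Bool.or_eq_true, Bool.not_eq_true'] at h1
  rcases h1 with h1 | h1
  · rw [hc] at h1; cases h1
  · exact h1

theorem pvMemUpperDomChar (name : String) (h : Dom_calculate_destiny_number name) :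
    ∀ x ∈ (PySem.Str.upper name).toList, pvDomChar x = true := by
  intro x hx
  rw [PySem.Str.toList_upper, PySem.Chars.upper] at hx
  obtain ⟨c, hc, rfl⟩ := List.mem_map.mp hx
  have hdc : pvDomChar c = true := by
    unfold Dom_calculate_destiny_number pvDomStr at h
    exact List.all_eq_true.mp h c hc
  have := pvCharOK_of_dom c hdc
  simp only [pvCharOK, Bool.and_eq_true] at this
  exact this.1

-- B's fold only ever adds nonnegative amounts
theorem pvTotalB_nonneg (l : List Char) : ∀ acc : Int, 0 ≤ acc →
    0 ≤ l.foldl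
      (fun acc c =>
        if 'A' ≤ c ∧ c ≤ 'Z' then acc + (PySem.Int.mod ((c.toNat : Int) - 65) 9 + 1) else acc)
      acc := by
  induction l with
  | nil => intro acc h; simpa using h
  | cons c t ih =>
    intro acc h
    simp only [List.foldl_cons]
    apply ih
    split
    · have := PySem.Int.mod_nonneg ((c.toNat : Int) - 65) (b := 9) (by norm_num)
      omega
    · exact h

-- ===== VERDICT (by name: the statement is the Claim_ definition above) =====
theorem calculate_destiny_number_spec : Claim_equal_calculate_destiny_number := by
  intro name hdom
  unfold Spec_calculate_destiny_number calculate_destiny_number calculate_destiny_number_alt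
  have hmem := pvMemUpperDomChar name hdom
  have hbody : ∀ x ∈ (PySem.Str.upper name).toList, ∀ acc : Int,
      (if PySem.Chars.isalpha x then acc + pvLetterValues.getD x 0 else acc)
        = (if 'A' ≤ x ∧ x ≤ 'Z' then acc + (PySem.Int.mod ((x.toNat : Int) - 65) 9 + 1) else acc) := by
    intro x hx acc
    have hok := pvCharOK_of_dom x (hmem x hx)
    simp only [pvCharOK, Bool.and_eq_true, beq_iff_eq] at hok
    have e1 : (if PySem.Chars.isalpha x then acc + pvLetterValues.getD x 0 else acc)
        = acc + (if PySem.Chars.isalpha x then pvLetterValues.getD x 0 else 0) := by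
      split <;> simp
    have e2 : (if 'A' ≤ x ∧ x ≤ 'Z' then acc + (PySem.Int.mod ((x.toNat : Int) - 65) 9 + 1) else acc)
        = acc + (if 'A' ≤ x ∧ x ≤ 'Z' then PySem.Int.mod ((x.toNat : Int) - 65) 9 + 1 else 0) := by
      split <;> simp
    rw [e1, e2, hok.2]
  show reduce_number ((PySem.Str.upper name).toList.foldl
      (fun acc c => if PySem.Chars.isalpha c then acc + pvLetterValues.getD c 0 else acc) 0)
    = reduce_alt ((PySem.Str.upper name).toList.foldl
      (fun acc c =>
        if 'A' ≤ c ∧ c ≤ 'Z' then acc + (PySem.Int.mod ((c.toNat : Int) - 65) 9 + 1) else acc) 0)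
  have htot := PySem.List.foldl_congr_mem' (init := (0 : Int)) (h := hbody)
  rw [htot]
  exact pvReduce_eq _ (pvTotalB_nonneg _ 0 le_rfl)
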